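-- pv_equiv track=rewrite | github.com/darrenjwiseman/Motley-Crews-Agent-Battle | motley_crews_play/eval_sweep.py | _split_seeds
-- ===== SOURCE A (Python) =====
-- class SweepConfigError(ValueError):
--     pass
--
-- def _split_seeds(seeds: list[int], n_shards: int) -> list[list[int]]:
--     """Split ``seeds`` into ``n_shards`` contiguous index ranges; no empty shards when len(seeds) >= n_shards."""
--     n = len(seeds)
--     if n_shards < 1:
--         raise SweepConfigError("n_shards must be >= 1")
--     if n == 0:
--         return []
--     n_shards_eff = min(n_shards, n)
--     out: list[list[int]] = []
--     for i in range(n_shards_eff):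
--         lo = i * n // n_shards_eff
--         hi = (i + 1) * n // n_shards_eff
--         out.append(seeds[lo:hi])
--     return out
-- ===== SOURCE B (Python) =====
-- class SweepConfigError(ValueError):
--     pass
--
--
-- def _split_seeds(seeds: list[int], n_shards: int) -> list[list[int]]:
--     """Split ``seeds`` into contiguous shards with a running position and a
--     Bresenham-style remainder accumulator instead of recomputing each
--     boundary as i*n//n_shards_eff."""
--     n = len(seeds)
--     if n_shards < 1:
--         raise SweepConfigError("n_shards must be >= 1")
--     if n == 0:
--         return []
--     k = min(n_shards, n)
--     base, rem = divmod(n, k)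
--     out: list[list[int]] = []
--     pos = 0
--     r = 0
--     for _ in range(k):
--         size = base + (1 if r + rem >= k else 0)
--         r = (r + rem) % k
--         out.append(seeds[pos:pos + size])
--         pos += size
--     return out
-- ===== Notes on version B (the rewrite author's own statement) =====
-- stated objective: alternative
-- what changed: Replaces the per-shard boundary formula lo=i*n//k, hi=(i+1)*n//k with a single pass threading a running position and a Bresenham-style remainder accumulator that decides which shards get one extra element.
import Mathlib
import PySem

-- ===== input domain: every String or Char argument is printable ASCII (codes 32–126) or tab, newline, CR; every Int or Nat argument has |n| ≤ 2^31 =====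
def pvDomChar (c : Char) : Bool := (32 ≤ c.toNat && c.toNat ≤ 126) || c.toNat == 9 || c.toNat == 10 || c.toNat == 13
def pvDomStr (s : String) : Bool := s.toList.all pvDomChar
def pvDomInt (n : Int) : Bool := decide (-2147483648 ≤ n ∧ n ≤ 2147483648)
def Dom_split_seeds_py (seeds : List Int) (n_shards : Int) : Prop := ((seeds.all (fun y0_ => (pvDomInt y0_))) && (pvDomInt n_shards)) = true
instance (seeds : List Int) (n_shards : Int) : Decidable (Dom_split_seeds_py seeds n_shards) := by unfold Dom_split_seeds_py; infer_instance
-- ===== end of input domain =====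

-- B replaces A's per-shard boundary formula i*n//k with a single pass threading a running
-- position and a Bresenham-style remainder accumulator (objective: alternative, same cost).

-- ===== PORT A =====
def split_seeds_py (seeds : List Int) (n_shards : Int) : List (List Int) :=
  let n : Int := seeds.length
  if n_shards < 1 then []  -- raise SweepConfigError: excluded by Pre_split_seeds_py
  else if n = 0 then []
  else
    let k := min n_shards n
    (PySem.List.pyRange 0 k 1).foldl
      (fun out i =>
        out ++ [PySem.List.slice seeds (some (PySem.Int.floordiv (i * n) k))
                                       (some (PySem.Int.floordiv ((i + 1) * n) k))]) []

-- ===== PORT B =====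
def split_seeds_py_alt (seeds : List Int) (n_shards : Int) : List (List Int) :=
  let n : Int := seeds.length
  if n_shards < 1 then []  -- raise SweepConfigError: excluded by Pre_split_seeds_py
  else if n = 0 then []
  else
    let k := min n_shards n
    let base := PySem.Int.floordiv n k
    let rem := PySem.Int.mod n k
    ((PySem.List.pyRange 0 k 1).foldl
      (fun (st : Int × Int × List (List Int)) _ =>
        let size := base + (if st.2.1 + rem ≥ k then (1 : Int) else 0)
        (st.1 + size, PySem.Int.mod (st.2.1 + rem) k,
          st.2.2 ++ [PySem.List.slice seeds (some st.1) (some (st.1 + size))]))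
      ((0 : Int), (0 : Int), ([] : List (List Int)))).2.2

-- ===== PRECONDITION & SPEC =====
-- Pre_ excludes exactly n_shards < 1, where A raises SweepConfigError (B raises too).
def Pre_split_seeds_py (seeds : List Int) (n_shards : Int) : Prop := 1 ≤ n_shards
instance (seeds : List Int) (n_shards : Int) : Decidable (Pre_split_seeds_py seeds n_shards) := by unfold Pre_split_seeds_py; infer_instance
def pvWitness_split_seeds_py : List Int × Int := ([10, 20, 30], 2)

def Spec_split_seeds_py (seeds : List Int) (n_shards : Int) (out : List (List Int)) : Prop := out = split_seeds_py_alt seeds n_shards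
instance (seeds : List Int) (n_shards : Int) (out : List (List Int)) : Decidable (Spec_split_seeds_py seeds n_shards out) := by unfold Spec_split_seeds_py; infer_instance

-- ===== CLAIM (what is proved, stated in full; the proofs are below) =====
def Claim_equal_split_seeds_py : Prop := ∀ (seeds : List Int) (n_shards : Int), Dom_split_seeds_py seeds n_shards → Pre_split_seeds_py seeds n_shards → Spec_split_seeds_py seeds n_shards (split_seeds_py seeds n_shards)

-- ===== LEMMAS AND PROOFS =====

-- folding "append one slice" is mapping
lemma pv_foldl_push {α β : Type} (f : α → β) :
    ∀ (l : List α) (acc : List β),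
      l.foldl (fun out i => out ++ [f i]) acc = acc ++ l.map f := by
  intro l
  induction l with
  | nil => simp
  | cons x xs ih => intro acc; simp [ih]

-- floor-division of a sum: the carry is 1 exactly when the remainders overflow
lemma pv_ediv_add (a b k : Int) (hk : 0 < k) :
    (a + b) / k = a / k + b / k + (if a % k + b % k ≥ k then (1 : Int) else 0) := by
  have ha := Int.mul_ediv_add_emod a k
  have hb := Int.mul_ediv_add_emod b k
  have h1 : a + b = (a % k + b % k) + k * (a / k + b / k) := by linear_combination -ha - hb
  have hs0 : 0 ≤ a % k + b % k := by
    have := Int.emod_nonneg a hk.ne'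
    have := Int.emod_nonneg b hk.ne'
    omega
  have hs2 : a % k + b % k < 2 * k := by
    have := Int.emod_lt_of_pos a hk
    have := Int.emod_lt_of_pos b hk
    omega
  rw [h1, Int.add_mul_ediv_left _ _ hk.ne']
  split_ifs with h
  · have hle : 1 ≤ (a % k + b % k) / k := by
      rw [Int.le_ediv_iff_mul_le hk]; omega
    have hlt : (a % k + b % k) / k < 2 := by
      rw [Int.ediv_lt_iff_lt_mul hk]; omega
    omega
  · have : (a % k + b % k) / k = 0 := Int.ediv_eq_zero_of_lt hs0 (by omega)
    omega

-- the loop invariant of B's fold: after m iterations the position is m*n/k,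
-- the accumulator is (m*n)%k, and the output is A's first m slices
lemma pv_loop_inv (seeds : List Int) (n k : Int) (hk : 0 < k) (m : Nat) :
    ((List.range m).foldl
      (fun (st : Int × Int × List (List Int)) (_ : Nat) =>
        (st.1 + (n / k + (if st.2.1 + n % k ≥ k then (1 : Int) else 0)),
          (st.2.1 + n % k) % k,
          st.2.2 ++ [PySem.List.slice seeds (some st.1)
            (some (st.1 + (n / k + (if st.2.1 + n % k ≥ k then (1 : Int) else 0))))]))
      ((0 : Int), (0 : Int), ([] : List (List Int))))
    = (((m : Int) * n) / k, ((m : Int) * n) % k,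
        (List.range m).map (fun t : Nat =>
          PySem.List.slice seeds (some ((t : Int) * n / k)) (some (((t : Int) + 1) * n / k)))) := by
  induction m with
  | zero => simp
  | succ m ih =>
    rw [List.range_succ, List.foldl_append, ih]
    have hpos : ((m : Int) * n) / k + (n / k + (if ((m : Int) * n) % k + n % k ≥ k then (1 : Int) else 0))
        = (((m : Int) + 1) * n) / k := by
      rw [show ((m : Int) + 1) * n = (m : Int) * n + n by ring, pv_ediv_add _ _ _ hk]
      ring
    have hmod : (((m : Int) * n) % k + n % k) % k = (((m : Int) + 1) * n) % k := by
      rw [show ((m : Int) + 1) * n = (m : Int) * n + n by ring]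
      exact (Int.add_emod _ _ _).symm
    simp only [List.foldl_cons, List.foldl_nil, List.map_append, List.map_cons, List.map_nil]
    rw [Prod.mk.injEq, Prod.mk.injEq]
    refine ⟨?_, ?_, ?_⟩
    · push_cast; rw [← hpos]
    · push_cast; rw [← hmod]
    · rw [← hpos]

-- ===== VERDICT (by name: the statement is the Claim_ definition above) =====
theorem split_seeds_py_spec : Claim_equal_split_seeds_py := by
  intro seeds n_shards _ hpre
  unfold Pre_split_seeds_py at hpre
  show split_seeds_py seeds n_shards = split_seeds_py_alt seeds n_shards
  simp only [split_seeds_py, split_seeds_py_alt]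
  have h1 : ¬ (n_shards < 1) := not_lt.mpr hpre
  simp only [if_neg h1]
  by_cases h2 : (seeds.length : Int) = 0
  · simp [h2]
  · simp only [if_neg h2]
    have hk : 0 < min n_shards (seeds.length : Int) := by
      have h0 : (0 : Int) ≤ (seeds.length : Int) := by positivity
      omega
    set n : Int := (seeds.length : Int) with hn
    set k : Int := min n_shards n with hkdef
    simp only [PySem.List.pyRange_one, Int.sub_zero, zero_add,
      PySem.Int.floordiv_eq_ediv_of_pos hk, PySem.Int.mod_eq_emod_of_pos hk,
      List.foldl_map]
    rw [pv_foldl_push, pv_loop_inv seeds n k hk]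
    simp
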